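-- pv_equiv track=rewrite | github.com/Syed-Naeem-naqvi/Python_APS106 | Lab 7/lab7.py | expr_form
-- ===== SOURCE A (Python) =====
-- def expr_form(expr_coeffs, expr_molecs):
--     """
--     (tuple (of ints), tuple (of dictionaries)) -> dictionary
--
--     This function accepts two input tuples that represent a chemical expression,
--     or one side of a chemical equation. The first tuple contains integers that
--     represent the coefficients for molecules within the expression. The second
--     tuple contains dictionaries that define these molecules. The molecule
--     dictionaries have the form {'atomic symbol' : number of atoms}. The order
--     of the coefficients correspond to the order of molecule dictionaries.
--     The function creates and returns a dictionary containing all elements within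
--     the expression as keys and the corresponding number of atoms for each element
--     within the expression as values.
--
--     For example, consider the expression 2NaCl + H2 + 5NaF
--
--     >>> expr_form((2,1,5), ({"Na":1, "Cl":1}, {"H":2}, {"Na":1, "F":1}))
--     {'Na': 7, 'Cl': 2, 'H': 2, 'F': 5}
--
--     """
--     # TODO your code here
--     out_dict = {}
--     for i in range(len(expr_coeffs)):
--         factor = expr_coeffs[i]
--         subdict = expr_molecs[i]
--
--         for key, value in subdict.items():
--             if key not in out_dict:
--                 out_dict[key] = value * factor
--             else:
--                 old_value = out_dict[key]
--                 out_dict[key] = old_value + value * factor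
--
--     return out_dict
-- ===== SOURCE B (Python) =====
-- def expr_form(expr_coeffs, expr_molecs):
--     # element-outer decomposition: collect element symbols in first-encounter
--     # order, then sum each element's coefficient-weighted count across molecules
--     pairs = list(zip(expr_coeffs, expr_molecs))
--     keys = list(dict.fromkeys(k for _, m in pairs for k in m))
--     return {el: sum(c * m.get(el, 0) for c, m in pairs) for el in keys}
-- ===== Notes on version B (the rewrite author's own statement) =====
-- stated objective: alternative
-- what changed: B inverts the loop nesting: instead of accumulating a dict molecule by molecule with per-key membership tests and in-place updates, it first collects the element symbols in first-encounter order and then computes each element's total as one sum over all (coefficient, molecule) pairs with get(el, 0).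
import Mathlib
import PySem

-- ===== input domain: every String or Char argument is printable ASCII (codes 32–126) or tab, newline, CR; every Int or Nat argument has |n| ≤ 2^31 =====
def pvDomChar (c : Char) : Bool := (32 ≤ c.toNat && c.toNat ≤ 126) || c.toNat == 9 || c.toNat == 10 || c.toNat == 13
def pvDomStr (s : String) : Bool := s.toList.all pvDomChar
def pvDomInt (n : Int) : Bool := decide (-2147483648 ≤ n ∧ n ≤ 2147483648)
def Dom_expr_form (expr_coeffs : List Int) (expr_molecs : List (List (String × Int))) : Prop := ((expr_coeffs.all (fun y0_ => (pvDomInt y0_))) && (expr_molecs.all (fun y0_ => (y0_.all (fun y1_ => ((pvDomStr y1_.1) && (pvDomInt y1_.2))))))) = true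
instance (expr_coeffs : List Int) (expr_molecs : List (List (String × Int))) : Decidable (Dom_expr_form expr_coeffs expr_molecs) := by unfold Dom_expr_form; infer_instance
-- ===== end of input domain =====

-- B inverts A's loop nesting (element-outer sums instead of a molecule-by-molecule dict
-- accumulator); same results, no speed claim ("alternative").


-- ===== PORT A =====
-- out_dict = {}; for i in range(len(expr_coeffs)): factor = expr_coeffs[i]; subdict = expr_molecs[i];
--   for key, value in subdict.items(): insert or add.  Indexing expr_molecs[i] is in range under Pre_;
--   subdict.items() iterates the association list, exact because Pre_ gives each molecule distinct keys.
def expr_form (expr_coeffs : List Int) (expr_molecs : List (List (String × Int))) : List (String × Int) :=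
  let out_dict : PySem.Dict String Int :=
    (PySem.List.pyRange 0 expr_coeffs.length 1).foldl (fun od i =>
      let factor := PySem.List.pyGetD expr_coeffs i 0
      let subdict := PySem.List.pyGetD expr_molecs i []
      subdict.foldl (fun od kv =>
        if od.contains kv.1 = false then od.insert kv.1 (kv.2 * factor)
        else
          let old_value := od.getD kv.1 0
          od.insert kv.1 (old_value + kv.2 * factor)) od)
      PySem.Dict.empty
  out_dict.items

-- ===== PORT B =====
-- pairs = list(zip(...)); keys = list(dict.fromkeys(k for _, m in pairs for k in m));
-- {el: sum(c * m.get(el, 0) for c, m in pairs) for el in keys}  (m.get = first-match lookup, exact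
-- under Pre_'s distinct keys; the comprehension's keys are distinct so the dict is the plain map)
def expr_form_alt (expr_coeffs : List Int) (expr_molecs : List (List (String × Int))) : List (String × Int) :=
  let pairs := expr_coeffs.zip expr_molecs
  let keys := PySem.List.dedup (pairs.flatMap (fun p => p.2.map Prod.fst))
  keys.map (fun el => (el, (pairs.map (fun p => p.1 * ((p.2.lookup el).getD 0))).sum))

-- ===== PRECONDITION & SPEC =====
-- A raises IndexError when expr_coeffs is longer than expr_molecs; the Nodup condition just says the
-- association lists encode Python dicts (a Python dict cannot carry duplicate keys), excluding no Python input.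
def Pre_expr_form (expr_coeffs : List Int) (expr_molecs : List (List (String × Int))) : Prop :=
  expr_coeffs.length ≤ expr_molecs.length ∧ ∀ m ∈ expr_molecs, (m.map Prod.fst).Nodup
instance (expr_coeffs : List Int) (expr_molecs : List (List (String × Int))) : Decidable (Pre_expr_form expr_coeffs expr_molecs) := by unfold Pre_expr_form; infer_instance
def pvWitness_expr_form : List Int × (List (List (String × Int))) :=
  ([2, 1, 5], [[("Na", 1), ("Cl", 1)], [("H", 2)], [("Na", 1), ("F", 1)]])

def Spec_expr_form (expr_coeffs : List Int) (expr_molecs : List (List (String × Int))) (out : List (String × Int)) : Prop := out = expr_form_alt expr_coeffs expr_molecs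
instance (expr_coeffs : List Int) (expr_molecs : List (List (String × Int))) (out : List (String × Int)) : Decidable (Spec_expr_form expr_coeffs expr_molecs out) := by unfold Spec_expr_form; infer_instance

-- ===== CLAIM (what is proved, stated in full; the proofs are below) =====
def Claim_equal_expr_form : Prop := ∀ (expr_coeffs : List Int) (expr_molecs : List (List (String × Int))), Dom_expr_form expr_coeffs expr_molecs → Pre_expr_form expr_coeffs expr_molecs → Spec_expr_form expr_coeffs expr_molecs (expr_form expr_coeffs expr_molecs)

-- ===== LEMMAS AND PROOFS =====

-- total atom count of element k in the (coefficient, molecule) pair list ps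
def pvTotal (ps : List (Int × List (String × Int))) (k : String) : Int :=
  (ps.map (fun p => p.1 * ((p.2.lookup k).getD 0))).sum

-- the dict A has built after processing ps, in closed form
def pvCanon (ps : List (Int × List (String × Int))) : PySem.Dict String Int :=
  ⟨(PySem.List.dedup (ps.flatMap (fun p => p.2.map Prod.fst))).map (fun k => (k, pvTotal ps k))⟩

theorem pv_lookup_cons (k0 k : String) (v : Int) (m : List (String × Int)) :
    List.lookup k0 ((k, v) :: m) = if k0 = k then some v else List.lookup k0 m := by
  rw [List.lookup_cons]
  by_cases h : k0 = k
  · simp [h]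
  · rw [if_neg h, beq_eq_false_iff_ne.mpr h]

theorem pv_lookup_eq_none (k : String) (m : List (String × Int)) (h : k ∉ m.map Prod.fst) :
    List.lookup k m = none := by
  induction m with
  | nil => rfl
  | cons a t ih =>
    obtain ⟨ka, va⟩ := a
    simp at h
    rw [pv_lookup_cons, if_neg h.1]
    exact ih (by simpa using fun x hx => h.2 x hx)

theorem pv_total_zero (ps : List (Int × List (String × Int))) (k : String)
    (h : k ∉ PySem.List.dedup (ps.flatMap fun p => p.2.map Prod.fst)) : pvTotal ps k = 0 := by
  rw [PySem.List.dedup_eq_ofList, PySem.Set.mem_ofList] at h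
  apply List.sum_eq_zero
  intro x hx
  simp only [List.mem_map] at hx
  obtain ⟨p, hp, rfl⟩ := hx
  rw [pv_lookup_eq_none k p.2 (fun hk => h (List.mem_flatMap.mpr ⟨p, hp, hk⟩))]
  simp

-- the inner molecule loop, on a dict of shape ⟨K.map (k, t k)⟩
theorem pv_inner (f : Int) (m : List (String × Int)) (hm : (m.map Prod.fst).Nodup) :
    ∀ (K : List String) (t : String → Int), K.Nodup →
    m.foldl (fun (od : PySem.Dict String Int) (kv : String × Int) =>
        if od.contains kv.1 = false then od.insert kv.1 (kv.2 * f)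
        else
          let old_value := od.getD kv.1 0
          od.insert kv.1 (old_value + kv.2 * f))
      (PySem.Dict.mk (K.map (fun k => (k, t k))))
    = PySem.Dict.mk ((PySem.Set.update (K : PySem.Set String) (m.map Prod.fst)).map
        (fun k => (k, (if k ∈ K then t k else 0) + f * ((m.lookup k).getD 0)))) := by
  induction m with
  | nil =>
    intro K t hK
    simp only [List.map_nil, List.foldl_nil, PySem.Set.update_nil]
    refine congrArg PySem.Dict.mk ?_
    refine (List.map_congr_left ?_).symm
    intro k hk
    simp [hk, List.lookup]
  | cons a m2 ih =>
    obtain ⟨k, v⟩ := a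
    intro K t hK
    rw [List.map_cons, List.nodup_cons] at hm
    obtain ⟨hknotin, hm2⟩ := hm
    rw [List.foldl_cons, List.map_cons, PySem.Set.update_cons]
    by_cases hkK : k ∈ K
    · have hadd : PySem.Set.add (K : PySem.Set String) k = (K : PySem.Set String) := PySem.Set.add_of_mem hkK
      have hc : (PySem.Dict.mk (K.map (fun k => (k, t k)))).contains k = true := by
        simpa [PySem.Dict.contains_mk, List.any_map, List.any_eq_true] using hkK
      have hget : (PySem.Dict.mk (K.map (fun k => (k, t k)))).getD k 0 = t k := by
        refine PySem.Dict.getD_of_mem_items _ ?_ ?_ 0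
        · exact List.mem_map_of_mem hkK
        · simpa [PySem.Dict.keys_mk, List.map_map, Function.comp_def] using hK
      have hins : (PySem.Dict.mk (K.map (fun k => (k, t k)))).insert k (t k + v * f)
          = PySem.Dict.mk (K.map (fun x => (x, if x = k then t k + v * f else t x))) := by
        apply PySem.Dict.ext
        rw [PySem.Dict.items_insert_of_contains _ _ hc]
        show _ = List.map (fun x => (x, if x = k then t k + v * f else t x)) K
        rw [List.map_map]
        apply List.map_congr_left
        intro x hx
        by_cases hxk : x = k <;> simp [hxk]
      simp only [hc, hget]
      norm_num
      rw [hins]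
      refine (ih hm2 K (fun x => if x = k then t k + v * f else t x) hK).trans ?_
      rw [hadd]
      refine congrArg PySem.Dict.mk (List.map_congr_left ?_)
      intro k0 hk0
      by_cases h0 : k0 = k
      · subst h0
        rw [pv_lookup_eq_none k0 m2 hknotin, pv_lookup_cons, if_pos rfl]
        simp [hkK]
        ring
      · rw [pv_lookup_cons, if_neg h0]
        simp [h0]
    · have hadd : (PySem.Set.add (K : PySem.Set String) k : List String) = K ++ [k] := by
        simp [PySem.Set.add, hkK]
      have hc : (PySem.Dict.mk (K.map (fun k => (k, t k)))).contains k = false := by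
        simp [PySem.Dict.contains_mk, List.any_map]
        exact fun x hx h => hkK (by rwa [h] at hx)
      have hK' : (K ++ [k]).Nodup := by
        simp [List.nodup_append, hK]
        exact fun a ha h => hkK (by rwa [h] at ha)
      have hins : (PySem.Dict.mk (K.map (fun k => (k, t k)))).insert k (v * f)
          = PySem.Dict.mk ((K ++ [k]).map (fun x => (x, if x = k then v * f else t x))) := by
        apply PySem.Dict.ext
        rw [PySem.Dict.items_insert_of_not_contains _ _ hc]
        show _ = List.map (fun x => (x, if x = k then v * f else t x)) (K ++ [k])
        rw [List.map_append]
        congr 1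
        · apply List.map_congr_left
          intro x hx
          have : x ≠ k := fun h => hkK (h ▸ hx)
          simp [this]
        · simp
      simp only [hc]
      norm_num
      rw [hins]
      refine (ih hm2 (K ++ [k]) (fun x => if x = k then v * f else t x) hK').trans ?_
      rw [hadd]
      refine congrArg PySem.Dict.mk (List.map_congr_left ?_)
      intro k0 hk0
      by_cases h0 : k0 = k
      · subst h0
        rw [pv_lookup_eq_none k0 m2 hknotin, pv_lookup_cons, if_pos rfl]
        simp [hkK]
        ring
      · rw [pv_lookup_cons, if_neg h0]
        simp [h0]


-- the value of A's accumulator after each processed pair, in closed form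
theorem pv_outer (ps : List (Int × List (String × Int)))
    (hnd : ∀ p ∈ ps, (p.2.map Prod.fst).Nodup) :
    ps.foldl (fun od p =>
        p.2.foldl (fun od kv =>
          if od.contains kv.1 = false then od.insert kv.1 (kv.2 * p.1)
          else
            let old_value := od.getD kv.1 0
            od.insert kv.1 (old_value + kv.2 * p.1)) od)
      PySem.Dict.empty
    = pvCanon ps := by
  induction ps using List.reverseRecOn with
  | nil => rfl
  | append_singleton ps p ih =>
    have hndps : ∀ q ∈ ps, (q.2.map Prod.fst).Nodup := fun q hq => hnd q (by simp [hq])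
    have hmp : (p.2.map Prod.fst).Nodup := hnd p (by simp)
    obtain ⟨fc, m⟩ := p
    rw [List.foldl_append, List.foldl_cons, List.foldl_nil, ih hndps]
    have hK : (PySem.List.dedup (ps.flatMap fun q => q.2.map Prod.fst)).Nodup := by
      rw [PySem.List.dedup_eq_ofList]; exact PySem.Set.nodup_ofList _
    refine (pv_inner fc m hmp (PySem.List.dedup (ps.flatMap fun q => q.2.map Prod.fst))
      (pvTotal ps) hK).trans ?_
    have hkeys : PySem.Set.update
          ((PySem.List.dedup (ps.flatMap fun q => q.2.map Prod.fst) : List String) : PySem.Set String)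
          (m.map Prod.fst)
        = PySem.List.dedup ((ps ++ [(fc, m)]).flatMap fun q => q.2.map Prod.fst) := by
      rw [PySem.List.dedup_eq_ofList, PySem.List.dedup_eq_ofList, List.flatMap_append,
          PySem.Set.ofList_append]
      simp
    unfold pvCanon
    rw [← hkeys]
    refine congrArg PySem.Dict.mk (List.map_congr_left ?_)
    intro k0 hk0
    have htot : pvTotal (ps ++ [(fc, m)]) k0 = pvTotal ps k0 + fc * ((m.lookup k0).getD 0) := by
      simp [pvTotal]
    rw [htot]
    by_cases h0 : k0 ∈ PySem.List.dedup (ps.flatMap fun q => q.2.map Prod.fst)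
    · rw [if_pos h0]
    · rw [if_neg h0, pv_total_zero ps k0 h0]

theorem pv_zip_take (c : List Int) (ms : List (List (String × Int))) (h : c.length ≤ ms.length) :
    c.zip (ms.take c.length) = c.zip ms := by
  induction c generalizing ms with
  | nil => simp
  | cons a t ih =>
    cases ms with
    | nil => simp at h
    | cons b tms =>
      simp only [List.length_cons, List.take_succ_cons, List.zip_cons_cons]
      rw [ih tms (by simpa using h)]

-- A's indexed range loop is the fold over the zipped pairs
theorem pv_range_to_zip (c : List Int) (ms : List (List (String × Int)))
    (h : c.length ≤ ms.length) :
    (PySem.List.pyRange 0 c.length 1).foldl (fun od i =>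
        let factor := PySem.List.pyGetD c i 0
        let subdict := PySem.List.pyGetD ms i []
        subdict.foldl (fun od kv =>
          if od.contains kv.1 = false then od.insert kv.1 (kv.2 * factor)
          else
            let old_value := od.getD kv.1 0
            od.insert kv.1 (old_value + kv.2 * factor)) od)
      PySem.Dict.empty
    = (c.zip ms).foldl (fun od p =>
        p.2.foldl (fun od kv =>
          if od.contains kv.1 = false then od.insert kv.1 (kv.2 * p.1)
          else
            let old_value := od.getD kv.1 0
            od.insert kv.1 (old_value + kv.2 * p.1)) od)
      PySem.Dict.empty := by
  have aux : ∀ n : Nat, n ≤ c.length →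
      (PySem.List.pyRange 0 (n : Int) 1).foldl (fun od i =>
          let factor := PySem.List.pyGetD c i 0
          let subdict := PySem.List.pyGetD ms i []
          subdict.foldl (fun od kv =>
            if od.contains kv.1 = false then od.insert kv.1 (kv.2 * factor)
            else
              let old_value := od.getD kv.1 0
              od.insert kv.1 (old_value + kv.2 * factor)) od)
        PySem.Dict.empty
      = ((c.take n).zip (ms.take n)).foldl (fun od p =>
          p.2.foldl (fun od kv =>
            if od.contains kv.1 = false then od.insert kv.1 (kv.2 * p.1)
            else
              let old_value := od.getD kv.1 0
              od.insert kv.1 (old_value + kv.2 * p.1)) od)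
        PySem.Dict.empty := by
    intro n
    induction n with
    | zero => intro _; rfl
    | succ n ih =>
      intro hn
      have hn' : n ≤ c.length := by omega
      have hcn : n < c.length := by omega
      have hmn : n < ms.length := by omega
      rw [show ((n + 1 : Nat) : Int) = (n : Int) + 1 by push_cast; ring,
          PySem.List.pyRange_one_succ_right (by positivity)]
      rw [List.foldl_append, ih hn']
      rw [List.take_add_one, List.take_add_one, List.getElem?_eq_getElem hcn,
          List.getElem?_eq_getElem hmn]
      simp only [Option.toList_some]
      rw [List.zip_append (by simp [hcn.le, hmn.le]), List.foldl_append]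
      simp only [List.zip_cons_cons, List.zip_nil_right, List.foldl_cons, List.foldl_nil]
      simp only [PySem.List.pyGetD_natCast]
      rw [List.getD_eq_getElem c 0 hcn, List.getD_eq_getElem ms [] hmn]
  have h2 := aux c.length (le_refl _)
  rw [List.take_length, pv_zip_take c ms h] at h2
  exact h2

-- ===== VERDICT (by name: the statement is the Claim_ definition above) =====
theorem expr_form_spec : Claim_equal_expr_form := by
  intro c ms _ hpre
  obtain ⟨hlen, hnd⟩ := hpre
  show expr_form c ms = expr_form_alt c ms
  unfold expr_form expr_form_alt
  rw [pv_range_to_zip c ms hlen,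
      pv_outer (c.zip ms) (fun p hp => hnd p.2 (List.of_mem_zip hp).2)]
  rfl
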